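-- pv_equiv track=rewrite | github.com/wyk18703232953/myResearch | codeComplex/data copy/filteredData/python/np/python_np_0082.py | generate_inputs
-- ===== SOURCE A (Python) =====
-- def generate_inputs(n):
--     # n controls the length of s1 and s2
--     length = max(1, n)
--
--     # Generate s1 deterministically using '+', '-' pattern
--     # Example pattern: "+-++-+..." depending on i
--     s1_chars = []
--     for i in range(length):
--         if (i // 2) % 2 == 0:
--             s1_chars.append('+')
--         else:
--             s1_chars.append('-')
--     s1 = ''.join(s1_chars)
--
--     # Generate s2 deterministically using '+', '-', '?' pattern
--     # Use i % 3 to cycle through characters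
--     s2_chars = []
--     for i in range(length):
--         r = i % 3
--         if r == 0:
--             s2_chars.append('+')
--         elif r == 1:
--             s2_chars.append('-')
--         else:
--             s2_chars.append('?')
--     s2 = ''.join(s2_chars)
--
--     return s1, s2
-- ===== SOURCE B (Python) =====
-- def generate_inputs(n):
--     # Periodic construction: repeat each base unit and truncate to length.
--     length = max(1, n)
--     s1 = ('++--' * (length // 4 + 1))[:length]
--     s2 = ('+-?' * (length // 3 + 1))[:length]
--     return s1, s2
-- ===== Notes on version B (the rewrite author's own statement) =====
-- stated objective: simpler
-- what changed: Replaced the two per-index loops with branching by recognizing each string is periodic: B repeats the base units '++--' and '+-?' enough times and truncates to the target length.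
import Mathlib
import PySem

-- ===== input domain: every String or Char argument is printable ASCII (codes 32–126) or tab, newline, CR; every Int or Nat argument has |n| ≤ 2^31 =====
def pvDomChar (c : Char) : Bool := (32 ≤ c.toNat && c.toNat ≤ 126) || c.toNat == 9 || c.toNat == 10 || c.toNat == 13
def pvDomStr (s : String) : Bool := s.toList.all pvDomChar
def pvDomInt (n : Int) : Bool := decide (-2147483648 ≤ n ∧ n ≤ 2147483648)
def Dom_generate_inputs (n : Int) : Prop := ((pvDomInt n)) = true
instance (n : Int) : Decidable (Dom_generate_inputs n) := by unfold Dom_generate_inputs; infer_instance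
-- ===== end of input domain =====

-- B replaces the two per-index loops with repeat-and-truncate of the periodic units '++--' and '+-?' (objective: simpler).

-- ===== PORT A =====
def generate_inputs (n : Int) : String × String :=
  let length := max 1 n
  let s1_chars : List Char :=
    (PySem.List.pyRange 0 length 1).foldl
      (fun acc i =>
        if PySem.Int.mod (PySem.Int.floordiv i 2) 2 = 0 then acc ++ ['+'] else acc ++ ['-']) []
  let s1 := String.ofList s1_chars
  let s2_chars : List Char :=
    (PySem.List.pyRange 0 length 1).foldl
      (fun acc i =>
        let r := PySem.Int.mod i 3
        if r = 0 then acc ++ ['+'] else if r = 1 then acc ++ ['-'] else acc ++ ['?']) []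
  let s2 := String.ofList s2_chars
  (s1, s2)

-- ===== PORT B =====
def generate_inputs_alt (n : Int) : String × String :=
  let length := max 1 n
  let s1 := String.ofList (PySem.List.slice
    (List.flatten (List.replicate (PySem.Int.floordiv length 4 + 1).toNat "++--".toList))
    none (some length))
  let s2 := String.ofList (PySem.List.slice
    (List.flatten (List.replicate (PySem.Int.floordiv length 3 + 1).toNat "+-?".toList))
    none (some length))
  (s1, s2)

-- ===== PRECONDITION & SPEC =====
def Spec_generate_inputs (n : Int) (out : String × String) : Prop := out = generate_inputs_alt n
instance (n : Int) (out : String × String) : Decidable (Spec_generate_inputs n out) := by unfold Spec_generate_inputs; infer_instance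

-- ===== CLAIM (what is proved, stated in full; the proofs are below) =====
def Claim_equal_generate_inputs : Prop := ∀ (n : Int), Dom_generate_inputs n → Spec_generate_inputs n (generate_inputs n)

-- ===== LEMMAS AND PROOFS =====

-- an element of m copies of u, read cyclically
theorem pv_flat_rep_getElem? {α : Type} (u : List α) (m k : Nat) (hk : k < m * u.length) :
    (List.replicate m u).flatten[k]? = u[k % u.length]? := by
  induction m generalizing k with
  | zero => simp at hk
  | succ m ih =>
    rw [List.replicate_succ, List.flatten_cons]
    by_cases h : k < u.length
    · rw [List.getElem?_append_left h, Nat.mod_eq_of_lt h]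
    · have hle : u.length ≤ k := by omega
      have hm : (m + 1) * u.length = m * u.length + u.length := Nat.succ_mul m u.length
      have hk' : k - u.length < m * u.length := by omega
      rw [List.getElem?_append_right hle, ih _ hk', Nat.mod_eq_sub_mod hle]

-- truncating repeated copies of u yields the pointwise cyclic pattern
theorem pv_cyclic_take {α : Type} (u : List α) (f : Nat → α)
    (hf : ∀ k, u[k % u.length]? = some (f k)) (m len : Nat) (hlen : len ≤ m * u.length) :
    ((List.replicate m u).flatten).take len = (List.range len).map f := by
  apply List.ext_getElem?
  intro i
  by_cases hi : i < len
  · rw [List.getElem?_take_of_lt hi, pv_flat_rep_getElem? u m i (lt_of_lt_of_le hi hlen), hf i]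
    simp [hi]
  · have h1 : (((List.replicate m u).flatten).take len)[i]? = none := by
      apply List.getElem?_eq_none
      simp only [List.length_take]
      omega
    have h2 : ((List.range len).map f)[i]? = none := by
      apply List.getElem?_eq_none
      simp only [List.length_map, List.length_range]
      omega
    rw [h1, h2]

-- 'out.append(a if p else b)' fold
theorem pv_foldl_if2 {α β : Type} (p : α → Prop) [DecidablePred p] (a b : β)
    (l : List α) (acc : List β) :
    l.foldl (fun acc x => if p x then acc ++ [a] else acc ++ [b]) acc
      = acc ++ l.map (fun x => if p x then a else b) := by
  induction l generalizing acc with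
  | nil => simp
  | cons x xs ih => by_cases h : p x <;> simp [h, ih]

-- three-way appending fold
theorem pv_foldl_if3 {α β : Type} (p q : α → Prop) [DecidablePred p] [DecidablePred q]
    (a b c : β) (l : List α) (acc : List β) :
    l.foldl (fun acc x => if p x then acc ++ [a] else if q x then acc ++ [b] else acc ++ [c]) acc
      = acc ++ l.map (fun x => if p x then a else if q x then b else c) := by
  induction l generalizing acc with
  | nil => simp
  | cons x xs ih =>
    by_cases h : p x
    · simp [h, ih]
    · by_cases h' : q x <;> simp [h, h', ih]

def pvF1 (k : Nat) : Char := if k % 4 < 2 then '+' else '-'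
def pvF2 (k : Nat) : Char := if k % 3 = 0 then '+' else if k % 3 = 1 then '-' else '?'

theorem pv_hf1 (k : Nat) : "++--".toList[k % 4]? = some (pvF1 k) := by
  have h4 : k % 4 = 0 ∨ k % 4 = 1 ∨ k % 4 = 2 ∨ k % 4 = 3 := by omega
  rcases h4 with h | h | h | h <;> simp [pvF1, h]

theorem pv_hf2 (k : Nat) : "+-?".toList[k % 3]? = some (pvF2 k) := by
  have h3 : k % 3 = 0 ∨ k % 3 = 1 ∨ k % 3 = 2 := by omega
  rcases h3 with h | h | h <;> simp [pvF2, h]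

theorem pv_cond1 (k : Nat) :
    (PySem.Int.mod (PySem.Int.floordiv ((k : Int)) 2) 2 = 0) ↔ (k % 4 < 2) := by
  simp only [PySem.Int.floordiv, PySem.Int.mod, Int.fdiv_eq_ediv, Int.fmod_eq_emod]
  norm_num
  omega

theorem pv_cond2a (k : Nat) : (PySem.Int.mod ((k : Int)) 3 = 0) ↔ (k % 3 = 0) := by
  simp only [PySem.Int.mod, Int.fmod_eq_emod]; norm_num; omega

theorem pv_cond2b (k : Nat) : (PySem.Int.mod ((k : Int)) 3 = 1) ↔ (k % 3 = 1) := by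
  simp only [PySem.Int.mod, Int.fmod_eq_emod]; norm_num; omega

theorem pv_toNat_fd4 (len : Nat) :
    (PySem.Int.floordiv ((len : Int)) 4 + 1).toNat = len / 4 + 1 := by
  simp only [PySem.Int.floordiv, Int.fdiv_eq_ediv]
  norm_num
  omega

theorem pv_toNat_fd3 (len : Nat) :
    (PySem.Int.floordiv ((len : Int)) 3 + 1).toNat = len / 3 + 1 := by
  simp only [PySem.Int.floordiv, Int.fdiv_eq_ediv]
  norm_num
  omega

-- A's first loop computes the cyclic map
theorem pv_A1 (len : Nat) :
    (PySem.List.pyRange 0 ((len : Int)) 1).foldl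
      (fun acc i =>
        if PySem.Int.mod (PySem.Int.floordiv i 2) 2 = 0 then acc ++ ['+'] else acc ++ ['-']) []
      = (List.range len).map pvF1 := by
  rw [PySem.List.pyRange_one]
  simp only [Int.sub_zero, Int.toNat_natCast, List.foldl_map, zero_add]
  rw [pv_foldl_if2 (fun k : Nat => PySem.Int.mod (PySem.Int.floordiv ((k : Int)) 2) 2 = 0)]
  simp only [List.nil_append]
  apply List.map_congr_left
  intro k _
  by_cases h : k % 4 < 2
  · rw [if_pos ((pv_cond1 k).mpr h)]; simp [pvF1, h]
  · rw [if_neg (fun hc => h ((pv_cond1 k).mp hc))]; simp [pvF1, h]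

-- A's second loop computes the cyclic map
theorem pv_A2 (len : Nat) :
    (PySem.List.pyRange 0 ((len : Int)) 1).foldl
      (fun acc i =>
        let r := PySem.Int.mod i 3
        if r = 0 then acc ++ ['+'] else if r = 1 then acc ++ ['-'] else acc ++ ['?']) []
      = (List.range len).map pvF2 := by
  rw [PySem.List.pyRange_one]
  simp only [Int.sub_zero, Int.toNat_natCast, List.foldl_map, zero_add]
  rw [pv_foldl_if3 (fun k : Nat => PySem.Int.mod ((k : Int)) 3 = 0)
        (fun k : Nat => PySem.Int.mod ((k : Int)) 3 = 1)]
  simp only [List.nil_append]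
  apply List.map_congr_left
  intro k _
  simp only [pvF2, pv_cond2a, pv_cond2b]

-- B's first string is the same cyclic map
theorem pv_B1 (len : Nat) :
    PySem.List.slice
      (List.flatten (List.replicate (PySem.Int.floordiv ((len : Int)) 4 + 1).toNat "++--".toList))
      none (some ((len : Int)))
      = (List.range len).map pvF1 := by
  rw [pv_toNat_fd4, PySem.List.slice_to_natCast]
  exact pv_cyclic_take "++--".toList pvF1 pv_hf1 (len / 4 + 1) len (by simp; omega)

-- B's second string is the same cyclic map
theorem pv_B2 (len : Nat) :
    PySem.List.slice
      (List.flatten (List.replicate (PySem.Int.floordiv ((len : Int)) 3 + 1).toNat "+-?".toList))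
      none (some ((len : Int)))
      = (List.range len).map pvF2 := by
  rw [pv_toNat_fd3, PySem.List.slice_to_natCast]
  exact pv_cyclic_take "+-?".toList pvF2 pv_hf2 (len / 3 + 1) len (by simp; omega)

theorem pv_main (n : Int) : generate_inputs n = generate_inputs_alt n := by
  obtain ⟨len, hlen⟩ : ∃ len : Nat, max 1 n = (len : Int) :=
    ⟨(max 1 n).toNat, (Int.toNat_of_nonneg (by omega : (0:Int) ≤ max 1 n)).symm⟩
  simp only [generate_inputs, generate_inputs_alt, hlen]
  rw [pv_A1 len, pv_A2 len, pv_B1 len, pv_B2 len]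

-- ===== VERDICT (by name: the statement is the Claim_ definition above) =====
theorem generate_inputs_spec : Claim_equal_generate_inputs := by
  intro n _
  show generate_inputs n = generate_inputs_alt n
  exact pv_main n
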